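-- pv_equiv track=rewrite | github.com/nguyenkhanhnam/maitreya8-api | app.py | extract_csv_from_output
-- ===== SOURCE A (Python) =====
-- def extract_csv_from_output(raw_output: str) -> str | None:
--     """
--     Finds and extracts only the 'Vedic Planets' CSV data from the tool's raw output.
--     """
--     lines = raw_output.strip().split('\n')
--     csv_data_lines = []
--     found_header = False
--     header_start = 'Planet;'
--
--     for line in lines:
--         if line.strip().startswith(header_start):
--             found_header = True
--
--         if found_header:
--             # The table ends with a blank line
--             if not line.strip():
--                 break
--             csv_data_lines.append(line)
--
--     if not csv_data_lines:
--         return None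
--
--     return "\n".join(csv_data_lines)
-- ===== SOURCE B (Python) =====
-- def extract_csv_from_output(raw_output: str) -> str | None:
--     """
--     Finds and extracts only the 'Vedic Planets' CSV data from the tool's raw output.
--     Paragraph decomposition: first group the lines into blank-separated paragraphs,
--     then return the first paragraph's tail starting at a 'Planet;' header line.
--     """
--     paragraphs = []
--     current = []
--     for line in raw_output.strip().split('\n'):
--         if line.strip():
--             current.append(line)
--         else:
--             paragraphs.append(current)
--             current = []
--     paragraphs.append(current)
--     for para in paragraphs:
--         tail = para
--         while tail and not tail[0].strip().startswith('Planet;'):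
--             tail = tail[1:]
--         if tail:
--             return "\n".join(tail)
--     return None
-- ===== Notes on version B (the rewrite author's own statement) =====
-- stated objective: alternative
-- what changed: Replaces A's flag-driven single accumulation loop by a staged paragraph decomposition: the lines are first grouped into blank-separated paragraphs, then the answer is the first paragraph's tail starting at a 'Planet;' header line.
import Mathlib
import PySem

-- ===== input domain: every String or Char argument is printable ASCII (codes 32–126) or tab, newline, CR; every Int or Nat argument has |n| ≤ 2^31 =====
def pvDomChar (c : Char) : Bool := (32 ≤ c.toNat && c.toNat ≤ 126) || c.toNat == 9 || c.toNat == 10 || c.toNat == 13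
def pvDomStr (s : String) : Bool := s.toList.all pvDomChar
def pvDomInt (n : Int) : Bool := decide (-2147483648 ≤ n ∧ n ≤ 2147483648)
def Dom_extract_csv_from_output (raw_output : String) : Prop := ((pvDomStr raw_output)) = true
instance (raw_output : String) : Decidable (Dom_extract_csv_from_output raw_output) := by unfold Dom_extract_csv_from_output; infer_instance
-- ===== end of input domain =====

-- B replaces A's flag-driven accumulation loop by a staged paragraph decomposition:
-- group the lines into blank-separated paragraphs, then return the first paragraph's
-- tail starting at a 'Planet;' header line (return value only; neither mutates).

-- shared transliterations of the two Python line tests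
def pvIsHeader (l : String) : Bool := PySem.Str.startswith (PySem.Str.strip l) "Planet;"
def pvIsBlank (l : String) : Bool := PySem.Str.strip l == ""

-- ===== PORT A =====
def pvGoA : List String → List String → Bool → List String
  | [], acc, _ => acc
  | l :: rest, acc, found =>
    let found' := if pvIsHeader l then true else found
    if found' then
      if pvIsBlank l then acc
      else pvGoA rest (acc ++ [l]) found'
    else pvGoA rest acc found'

def extract_csv_from_output (raw_output : String) : Option String :=
  let lines := (PySem.Str.split? (PySem.Str.strip raw_output) "\n").getD []
  let csv := pvGoA lines [] false
  if csv = [] then none else some (PySem.Str.join "\n" csv)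

-- ===== PORT B =====
-- the grouping loop: state (paragraphs, current); after the loop the final
-- `paragraphs.append(current)` is the base case
def pvParasGo (paras : List (List String)) (cur : List String) : List String → List (List String)
  | [] => paras ++ [cur]
  | l :: rest =>
    if !pvIsBlank l then pvParasGo paras (cur ++ [l]) rest
    else pvParasGo (paras ++ [cur]) [] rest

-- the `while tail and not tail[0]...` loop
def pvDropNonHeader : List String → List String
  | [] => []
  | l :: r => if pvIsHeader l then l :: r else pvDropNonHeader r

-- the `for para in paragraphs` loop
def pvFindPara : List (List String) → Option String
  | [] => none
  | p :: ps =>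
    if pvDropNonHeader p = [] then pvFindPara ps
    else some (PySem.Str.join "\n" (pvDropNonHeader p))

def extract_csv_from_output_alt (raw_output : String) : Option String :=
  pvFindPara (pvParasGo [] [] ((PySem.Str.split? (PySem.Str.strip raw_output) "\n").getD []))

-- ===== PRECONDITION & SPEC =====
def Spec_extract_csv_from_output (raw_output : String) (out : Option String) : Prop := out = extract_csv_from_output_alt raw_output
instance (raw_output : String) (out : Option String) : Decidable (Spec_extract_csv_from_output raw_output out) := by unfold Spec_extract_csv_from_output; infer_instance

-- ===== CLAIM (what is proved, stated in full; the proofs are below) =====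
def Claim_equal_extract_csv_from_output : Prop := ∀ (raw_output : String), Dom_extract_csv_from_output raw_output → Spec_extract_csv_from_output raw_output (extract_csv_from_output raw_output)

-- ===== LEMMAS AND PROOFS =====

-- proof-side intermediate form: find the header line, then take the leading non-blank run
def pvTakeBlock : List String → List String
  | [] => []
  | l :: rest => if pvIsBlank l then [] else l :: pvTakeBlock rest

def pvGoB : List String → Option String
  | [] => none
  | l :: rest =>
    if pvIsHeader l then some (PySem.Str.join "\n" (pvTakeBlock (l :: rest)))
    else pvGoB rest

-- a line starting with "Planet;" after stripping is not blank
lemma pv_header_not_blank (l : String) (h : pvIsHeader l = true) : pvIsBlank l = false := by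
  unfold pvIsHeader at h
  unfold pvIsBlank
  by_contra hb
  simp only [Bool.not_eq_false, beq_iff_eq] at hb
  rw [hb] at h
  exact absurd h (by decide)

-- once the flag is true, A's loop collects exactly the leading non-blank run
lemma pvGoA_found (rest : List String) (acc : List String) :
    pvGoA rest acc true = acc ++ pvTakeBlock rest := by
  induction rest generalizing acc with
  | nil => simp [pvGoA, pvTakeBlock]
  | cons l r ih =>
    simp only [pvGoA, pvTakeBlock]
    by_cases hb : pvIsBlank l = true
    · simp [hb]
    · simp only [Bool.not_eq_true] at hb
      simp [hb, ih, List.append_assoc]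

-- A's result equals the intermediate find-then-take form
lemma pv_A_eq_goB (lines : List String) :
    (if pvGoA lines [] false = [] then none
     else some (PySem.Str.join "\n" (pvGoA lines [] false))) = pvGoB lines := by
  induction lines with
  | nil => simp [pvGoA, pvGoB]
  | cons l rest ih =>
    by_cases hh : pvIsHeader l = true
    · have hnb := pv_header_not_blank l hh
      simp only [pvGoA, pvGoB, hh, if_true, hnb, Bool.false_eq_true, if_false]
      rw [pvGoA_found]
      simp [pvTakeBlock, hnb]
    · simp only [Bool.not_eq_true] at hh
      simp only [pvGoA, pvGoB, hh, Bool.false_eq_true, if_false] at *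
      simpa using ih

-- the grouping loop distributes over the already-finished paragraphs
lemma pvParasGo_append (lines : List String) (paras : List (List String)) (cur : List String) :
    pvParasGo paras cur lines = paras ++ pvParasGo [] cur lines := by
  induction lines generalizing paras cur with
  | nil => simp [pvParasGo]
  | cons l rest ih =>
    simp only [pvParasGo]
    by_cases hb : pvIsBlank l = true
    · simp only [hb, Bool.not_true, Bool.false_eq_true, if_false]
      rw [ih, ih ([] ++ [cur])]
      simp only [List.nil_append, List.append_assoc]
    · simp only [Bool.not_eq_true] at hb
      simp only [hb, Bool.not_false, if_true]
      exact ih paras (cur ++ [l])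

lemma pvDropNonHeader_append (a b : List String) :
    pvDropNonHeader (a ++ b) =
      if pvDropNonHeader a = [] then pvDropNonHeader b else pvDropNonHeader a ++ b := by
  induction a with
  | nil => simp [pvDropNonHeader]
  | cons l r ih =>
    simp only [List.cons_append, pvDropNonHeader]
    by_cases hh : pvIsHeader l = true
    · simp [hh]
    · simp only [Bool.not_eq_true] at hh
      simp [hh, ih]

-- once the header has been seen inside the current paragraph, B returns that
-- paragraph's header tail extended by the leading non-blank run of the rest
lemma pv_found_para (rest : List String) (cur : List String)
    (h : pvDropNonHeader cur ≠ []) :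
    pvFindPara (pvParasGo [] cur rest) =
      some (PySem.Str.join "\n" (pvDropNonHeader cur ++ pvTakeBlock rest)) := by
  induction rest generalizing cur with
  | nil => simp [pvParasGo, pvFindPara, pvTakeBlock, h]
  | cons r rs ih =>
    simp only [pvParasGo, pvTakeBlock]
    by_cases hb : pvIsBlank r = true
    · simp only [hb, Bool.not_true, Bool.false_eq_true, if_false, if_true]
      rw [pvParasGo_append]
      simp [pvFindPara, h]
    · simp only [Bool.not_eq_true] at hb
      simp only [hb, Bool.not_false, if_true, Bool.false_eq_true, if_false]
      rw [ih (cur ++ [r]) (by rw [pvDropNonHeader_append]; simp [h])]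
      rw [pvDropNonHeader_append]
      simp [h]

-- main bridge: while the current paragraph holds no header, B's staged search
-- agrees with the find-then-take form on the remaining lines
lemma pv_B_eq_goB (lines : List String) (cur : List String)
    (h : pvDropNonHeader cur = []) :
    pvFindPara (pvParasGo [] cur lines) = pvGoB lines := by
  induction lines generalizing cur with
  | nil => simp [pvParasGo, pvFindPara, pvGoB, h]
  | cons l rest ih =>
    simp only [pvParasGo, pvGoB]
    by_cases hh : pvIsHeader l = true
    · have hnb := pv_header_not_blank l hh
      simp only [hh, if_true, hnb, Bool.not_false, if_true]
      have hd : pvDropNonHeader (cur ++ [l]) = [l] := by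
        rw [pvDropNonHeader_append, h]
        simp [pvDropNonHeader, hh]
      rw [pv_found_para rest (cur ++ [l]) (by rw [hd]; simp), hd]
      simp [pvTakeBlock, hnb]
    · simp only [Bool.not_eq_true] at hh
      simp only [hh, Bool.false_eq_true, if_false]
      by_cases hb : pvIsBlank l = true
      · simp only [hb, Bool.not_true, Bool.false_eq_true, if_false]
        rw [pvParasGo_append]
        have h1 : pvFindPara ([cur] ++ pvParasGo [] [] rest) = pvFindPara (pvParasGo [] [] rest) := by
          simp [pvFindPara, h]
        simp only [List.nil_append]
        rw [h1]
        exact ih [] rfl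
      · simp only [Bool.not_eq_true] at hb
        simp only [hb, Bool.not_false, if_true]
        exact ih (cur ++ [l]) (by rw [pvDropNonHeader_append, h]; simp [pvDropNonHeader, hh])

-- ===== VERDICT (by name: the statement is the Claim_ definition above) =====
theorem extract_csv_from_output_spec : Claim_equal_extract_csv_from_output := by
  intro raw _
  unfold Spec_extract_csv_from_output extract_csv_from_output extract_csv_from_output_alt
  rw [pv_B_eq_goB _ [] rfl]
  exact pv_A_eq_goB _
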